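-- pv_equiv track=rewrite | github.com/ch1nhpd/strix | strix/tools/assessment/assessment_browser_actions.py | _choose_value
-- ===== SOURCE A (Python) =====
-- def _choose_value(candidates: dict[str, str], keywords: tuple[str, ...]) -> str | None:
--     prioritized: list[tuple[int, str]] = []
--     for key, value in candidates.items():
--         lowered = key.lower()
--         score = sum(3 for keyword in keywords if keyword in lowered)
--         if value.lower().startswith("bearer "):
--             score += 4
--         if "." in value and len(value) > 20:
--             score += 2
--         if len(value) >= 24:
--             score += 1
--         if score > 0:
--             prioritized.append((score, key))
--
--     if not prioritized:
--         return None
--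
--     prioritized.sort(reverse=True)
--     return candidates[prioritized[0][1]]
-- ===== SOURCE B (Python) =====
-- def _score(key, value, keywords):
--     lowered = key.lower()
--     score = sum(3 for keyword in keywords if keyword in lowered)
--     if value.lower().startswith("bearer "):
--         score += 4
--     if "." in value and len(value) > 20:
--         score += 2
--     if len(value) >= 24:
--         score += 1
--     return score
--
--
-- def _choose_value(candidates: "dict[str, str]", keywords: "tuple[str, ...]") -> "str | None":
--     best = None  # running (score, key) maximum; no intermediate list, no sort
--     for key, value in candidates.items():
--         score = _score(key, value, keywords)
--         if score > 0 and (best is None or (score, key) > best):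
--             best = (score, key)
--     return None if best is None else candidates[best[1]]
-- ===== Notes on version B (the rewrite author's own statement) =====
-- stated objective: simpler
-- what changed: Replaces A's build-list-then-reverse-sort-then-index selection by a single pass that keeps one running best (score, key) tuple, eliminating the intermediate list and the sort.
import Mathlib
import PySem

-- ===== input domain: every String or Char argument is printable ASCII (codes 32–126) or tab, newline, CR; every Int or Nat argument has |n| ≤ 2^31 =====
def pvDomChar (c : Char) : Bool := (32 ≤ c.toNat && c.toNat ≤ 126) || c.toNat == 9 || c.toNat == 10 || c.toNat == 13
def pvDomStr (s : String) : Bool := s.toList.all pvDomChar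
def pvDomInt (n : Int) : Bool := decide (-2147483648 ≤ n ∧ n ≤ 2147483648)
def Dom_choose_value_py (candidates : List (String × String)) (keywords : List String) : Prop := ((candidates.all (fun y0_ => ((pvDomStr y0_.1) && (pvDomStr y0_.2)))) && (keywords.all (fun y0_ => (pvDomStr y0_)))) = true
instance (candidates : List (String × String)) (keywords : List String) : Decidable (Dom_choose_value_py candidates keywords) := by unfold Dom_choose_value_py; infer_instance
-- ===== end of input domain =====

-- B replaces A's append-to-list / reverse-sort / index-[0] selection by a one-pass running
-- best (score, key) maximum with the same per-key scoring; objective: simpler (no sort, no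
-- intermediate list). The dict is the assoc list in insertion order; candidates[key] = first match.

-- ===== PORT A =====
def choose_value_py (candidates : List (String × String)) (keywords : List String) : Option String :=
  let prioritized : List (Int × String) := candidates.foldl (fun acc kv =>
    let lowered := PySem.Str.lower kv.1
    let score : Int := keywords.foldl (fun s keyword => if PySem.Str.isIn keyword lowered then s + 3 else s) 0
    let score := if PySem.Str.startswith (PySem.Str.lower kv.2) "bearer " then score + 4 else score
    let score := if PySem.Str.isIn "." kv.2 && decide (20 < PySem.Str.len kv.2) then score + 2 else score
    let score := if decide (24 ≤ PySem.Str.len kv.2) then score + 1 else score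
    if 0 < score then acc ++ [(score, kv.1)] else acc) []
  if prioritized.isEmpty then none
  else
    -- prioritized.sort(reverse=True) on tuples = sorted2 on (fst, snd); candidates[key] never raises here
    candidates.lookup ((PySem.List.sorted2 prioritized (·.1) (·.2) true).headI.2)

-- ===== PORT B =====
def scoreB (keywords : List String) (key value : String) : Int :=
  let lowered := PySem.Str.lower key
  let score : Int := keywords.foldl (fun s keyword => if PySem.Str.isIn keyword lowered then s + 3 else s) 0
  let score := if PySem.Str.startswith (PySem.Str.lower value) "bearer " then score + 4 else score
  let score := if PySem.Str.isIn "." value && decide (20 < PySem.Str.len value) then score + 2 else score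
  if decide (24 ≤ PySem.Str.len value) then score + 1 else score

def choose_value_py_alt (candidates : List (String × String)) (keywords : List String) : Option String :=
  let best : Option (Int × String) := candidates.foldl (fun best kv =>
    let score := scoreB keywords kv.1 kv.2
    -- 'score > 0 and (best is None or (score, key) > best)': tuple > is lexicographic, strict
    if 0 < score &&
        (match best with
         | none => true
         | some b => decide (b.1 < score) || (b.1 == score && decide (b.2 < kv.1)))
    then some (score, kv.1) else best) none
  best.bind (fun b => candidates.lookup b.2)

-- ===== PRECONDITION & SPEC =====
def Spec_choose_value_py (candidates : List (String × String)) (keywords : List String) (out : Option String) : Prop := out = choose_value_py_alt candidates keywords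
instance (candidates : List (String × String)) (keywords : List String) (out : Option String) : Decidable (Spec_choose_value_py candidates keywords out) := by unfold Spec_choose_value_py; infer_instance

-- ===== CLAIM (what is proved, stated in full; the proofs are below) =====
def Claim_equal_choose_value_py : Prop := ∀ (candidates : List (String × String)) (keywords : List String), Dom_choose_value_py candidates keywords → Spec_choose_value_py candidates keywords (choose_value_py candidates keywords)

-- ===== LEMMAS AND PROOFS =====

-- the two fold bodies, named (definitionally equal to the lambdas inside the ports)
def pvAf (keywords : List String) (acc : List (Int × String)) (kv : String × String) : List (Int × String) :=
  let lowered := PySem.Str.lower kv.1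
  let score : Int := keywords.foldl (fun s keyword => if PySem.Str.isIn keyword lowered then s + 3 else s) 0
  let score := if PySem.Str.startswith (PySem.Str.lower kv.2) "bearer " then score + 4 else score
  let score := if PySem.Str.isIn "." kv.2 && decide (20 < PySem.Str.len kv.2) then score + 2 else score
  let score := if decide (24 ≤ PySem.Str.len kv.2) then score + 1 else score
  if 0 < score then acc ++ [(score, kv.1)] else acc

def pvBf (keywords : List String) (best : Option (Int × String)) (kv : String × String) : Option (Int × String) :=
  let score := scoreB keywords kv.1 kv.2
  if 0 < score &&
      (match best with
       | none => true
       | some b => decide (b.1 < score) || (b.1 == score && decide (b.2 < kv.1)))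
  then some (score, kv.1) else best

-- the strict 'new beats old' test used by both the stable reverse sort and B's running best
def pvStepMax (b : Option (Int × String)) (p : Int × String) : Option (Int × String) :=
  match b with
  | none => some p
  | some q => if decide (q.1 < p.1) || (!decide (p.1 < q.1) && decide (q.2 < p.2)) then some p else some q

theorem pvStepMax_isSome (l : List (Int × String)) (q : Int × String) :
    ∃ m, l.foldl pvStepMax (some q) = some m := by
  induction l generalizing q with
  | nil => exact ⟨q, rfl⟩
  | cons x t ih =>
    simp only [List.foldl_cons, pvStepMax]
    split <;> exact ih _

theorem head?_foldl_insertBy (before : Int × String → Int × String → Bool)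
    (l : List (Int × String)) (acc : List (Int × String)) :
    (l.foldl (fun acc x => PySem.List.insertBy before x acc) acc).head? =
      l.foldl (fun b x =>
        match b with
        | none => some x
        | some y => if before x y then some x else some y) acc.head? := by
  induction l generalizing acc with
  | nil => rfl
  | cons x t ih =>
    simp only [List.foldl_cons]
    rw [ih]
    congr 1
    cases acc with
    | nil => rfl
    | cons y ys =>
      simp only [PySem.List.insertBy, List.head?_cons]
      split <;> simp

theorem head?_sorted2_rev (l : List (Int × String)) :
    (PySem.List.sorted2 l (·.1) (·.2) true).head? = l.foldl pvStepMax none := by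
  rw [show PySem.List.sorted2 l (·.1 : Int × String → Int) (·.2 : Int × String → String) true =
        l.foldl (fun acc x => PySem.List.insertBy
          (fun a b => decide (b.1 < a.1) || (!decide (a.1 < b.1) && decide (b.2 < a.2))) x acc) [] from rfl]
  rw [head?_foldl_insertBy]
  rfl

theorem pvAf_step (sc : Int) (k : String) (acc : List (Int × String)) :
    (if 0 < sc then acc ++ [(sc, k)] else acc).foldl pvStepMax none =
      (if 0 < sc &&
          (match acc.foldl pvStepMax none with
           | none => true
           | some b => decide (b.1 < sc) || (b.1 == sc && decide (b.2 < k)))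
       then some (sc, k) else acc.foldl pvStepMax none) := by
  by_cases h : 0 < sc
  · rw [if_pos h, List.foldl_append]
    simp only [List.foldl_cons, List.foldl_nil]
    cases hb : acc.foldl pvStepMax none with
    | none => simp [pvStepMax, h]
    | some q =>
      simp only [pvStepMax, h, decide_true, Bool.true_and]
      have hc : (decide (q.1 < sc) || (!decide (sc < q.1) && decide (q.2 < k))) =
          (decide (q.1 < sc) || (q.1 == sc && decide (q.2 < k))) := by
        rcases lt_trichotomy q.1 sc with h1 | h1 | h1
        · simp [h1]
        · simp [h1]
        · simp [not_lt_of_gt h1, h1, h1.ne']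
      rw [hc]
  · simp [h]

theorem bfold_eq_maxfold (keywords : List String) (cs : List (String × String))
    (acc : List (Int × String)) :
    (cs.foldl (pvAf keywords) acc).foldl pvStepMax none =
      cs.foldl (pvBf keywords) (acc.foldl pvStepMax none) := by
  induction cs generalizing acc with
  | nil => rfl
  | cons kv t ih =>
    simp only [List.foldl_cons]
    rw [ih]
    congr 1
    exact pvAf_step (scoreB keywords kv.1 kv.2) kv.1 acc

theorem choose_value_eq (candidates : List (String × String)) (keywords : List String) :
    choose_value_py candidates keywords = choose_value_py_alt candidates keywords := by
  show (if (candidates.foldl (pvAf keywords) []).isEmpty then none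
        else candidates.lookup
          ((PySem.List.sorted2 (candidates.foldl (pvAf keywords) []) (·.1) (·.2) true).headI.2)) =
       (candidates.foldl (pvBf keywords) none).bind (fun b => candidates.lookup b.2)
  rw [show (none : Option (Int × String)) = ([] : List (Int × String)).foldl pvStepMax none from rfl,
      ← bfold_eq_maxfold keywords candidates []]
  generalize candidates.foldl (pvAf keywords) ([] : List (Int × String)) = l
  cases l with
  | nil => rfl
  | cons x t =>
    simp only [List.isEmpty_cons, Bool.false_eq_true, if_false]
    obtain ⟨m, hm⟩ := pvStepMax_isSome t x
    have hfold : (x :: t).foldl pvStepMax none = some m := by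
      rw [List.foldl_cons]; exact hm
    have h2 : (PySem.List.sorted2 (x :: t) (·.1) (·.2) true).head? = some m := by
      rw [head?_sorted2_rev]; exact hfold
    rw [hfold]
    cases hs : PySem.List.sorted2 (x :: t) (·.1) (·.2) true with
    | nil => rw [hs] at h2; simp at h2
    | cons y ys =>
      rw [hs] at h2
      simp only [List.head?_cons, Option.some.injEq] at h2
      simp [List.headI, h2]

-- ===== VERDICT (by name: the statement is the Claim_ definition above) =====
theorem choose_value_py_spec : Claim_equal_choose_value_py := by
  intro candidates keywords _
  show _ = _
  exact choose_value_eq candidates keywords
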